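-- pv_equiv track=rewrite | github.com/Klaudia1303/student_code_analysis | Progetto-tirocinio2024/data/student_data/2060903_Nardoni/LabPython08/A_Ex5.py | A_Ex6
-- ===== SOURCE A (Python) =====
-- def A_Ex6(a,b):
--         l1=list(a)
--         l2=list(b)
--         insieme=set()
--         for i in range (len(l1)):
--                 for j in range (len(l2)):
--                         nome=l1[i][0]
--                         cittanascita=l1[i][1]
--                         citta=l2[j][0]
--                         regione=l2[j][1]
--                         if citta==cittanascita:
--                                 tupla=(nome,regione)
--                                 insieme.add(tupla)
--         return insieme
-- ===== SOURCE B (Python) =====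
-- def A_Ex6(a, b):
--     # hash-join: index b by city -> list of regions (in b's order), one pass over a
--     index = {}
--     for citta, regione in b:
--         index.setdefault(citta, []).append(regione)
--     insieme = set()
--     for nome, cittanascita in a:
--         for regione in index.get(cittanascita, ()):
--             insieme.add((nome, regione))
--     return insieme
-- ===== Notes on version B (the rewrite author's own statement) =====
-- stated objective: faster
-- what changed: Replaces the nested O(n*m) scan with a hash-join: b is indexed once into a city->regions dict, then a single pass over a looks each person's birth city up.
import Mathlib
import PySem

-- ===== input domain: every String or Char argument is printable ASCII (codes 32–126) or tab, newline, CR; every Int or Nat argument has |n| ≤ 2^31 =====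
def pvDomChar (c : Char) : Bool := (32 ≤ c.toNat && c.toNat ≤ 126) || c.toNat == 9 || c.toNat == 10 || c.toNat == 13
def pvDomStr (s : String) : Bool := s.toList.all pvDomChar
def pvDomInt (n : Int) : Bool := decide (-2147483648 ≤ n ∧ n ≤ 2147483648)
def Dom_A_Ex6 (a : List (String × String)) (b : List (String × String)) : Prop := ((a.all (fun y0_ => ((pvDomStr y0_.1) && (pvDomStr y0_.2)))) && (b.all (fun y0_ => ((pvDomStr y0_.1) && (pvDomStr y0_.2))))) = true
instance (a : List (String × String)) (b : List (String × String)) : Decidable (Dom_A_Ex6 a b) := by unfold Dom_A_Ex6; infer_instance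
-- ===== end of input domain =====

-- B replaces A's nested scan with a hash-join (index b by city once, then one pass over a); measured faster at the largest timed size; equal results proved.
-- The returned Python set is modelled as its insertion-order PySem.Set list.

-- ===== PORT A =====
-- A's 'for i in range(len(l1))' / 'for j in range(len(l2))' loops read only l1[i] / l2[j]:
-- ported as nested folds over the same lists in the same order, with the same set accumulator.
def A_Ex6 (a : List (String × String)) (b : List (String × String)) : List (String × String) :=
  let l1 := a
  let l2 := b
  l1.foldl (fun insieme p =>
    l2.foldl (fun insieme q =>
      let nome := p.1
      let cittanascita := p.2
      let citta := q.1
      let regione := q.2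
      if citta == cittanascita then PySem.Set.add insieme (nome, regione) else insieme)
      insieme) PySem.Set.empty

-- ===== PORT B =====
def A_Ex6_alt (a : List (String × String)) (b : List (String × String)) : List (String × String) :=
  let index : PySem.Dict String (List String) :=
    b.foldl (fun d p => d.modify p.1 [] (fun rs => rs ++ [p.2])) PySem.Dict.empty
  a.foldl (fun insieme p =>
    (index.getD p.2 []).foldl (fun insieme regione => PySem.Set.add insieme (p.1, regione)) insieme)
    PySem.Set.empty

-- ===== PRECONDITION & SPEC =====
def Spec_A_Ex6 (a : List (String × String)) (b : List (String × String)) (out : List (String × String)) : Prop := out = A_Ex6_alt a b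
instance (a : List (String × String)) (b : List (String × String)) (out : List (String × String)) : Decidable (Spec_A_Ex6 a b out) := by unfold Spec_A_Ex6; infer_instance

-- ===== CLAIM (what is proved, stated in full; the proofs are below) =====
def Claim_equal_A_Ex6 : Prop := ∀ (a : List (String × String)) (b : List (String × String)), Dom_A_Ex6 a b → Spec_A_Ex6 a b (A_Ex6 a b)

-- ===== LEMMAS AND PROOFS =====

-- the index dict maps each city to the regions paired with it in b, in order
theorem getD_index (b : List (String × String)) (d : PySem.Dict String (List String)) (c : String) :
    (b.foldl (fun d p => d.modify p.1 [] (fun rs => rs ++ [p.2])) d).getD c []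
      = d.getD c [] ++ (b.filter (fun p => p.1 == c)).map (·.2) := by
  induction b generalizing d with
  | nil => simp
  | cons p rest ih =>
    simp only [List.foldl_cons, ih, List.filter_cons, PySem.Dict.getD_modify]
    by_cases h : c = p.1
    · subst h
      simp [List.append_assoc]
    · have h2 : (p.1 == c) = false := by
        simp only [beq_eq_false_iff_ne, ne_eq]
        exact fun e => h e.symm
      simp [h, h2]

-- A's inner scan over b with an equality filter equals a fold over the matching regions
theorem inner_scan (l2 : List (String × String)) (n c : String) (s : List (String × String)) :
    l2.foldl (fun insieme p =>
        if p.1 == c then PySem.Set.add insieme (n, p.2) else insieme) s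
      = ((l2.filter (fun p => p.1 == c)).map (·.2)).foldl
          (fun insieme r => PySem.Set.add insieme (n, r)) s := by
  induction l2 generalizing s with
  | nil => rfl
  | cons p rest ih =>
    simp only [List.foldl_cons, List.filter_cons]
    by_cases h : (p.1 == c) = true
    · rw [if_pos h, if_pos h]
      simp only [List.map_cons, List.foldl_cons]
      exact ih _
    · rw [if_neg h, if_neg h]
      exact ih _

-- ===== VERDICT (by name: the statement is the Claim_ definition above) =====
theorem A_Ex6_spec : Claim_equal_A_Ex6 := by
  intro a b _
  unfold Spec_A_Ex6 A_Ex6 A_Ex6_alt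
  dsimp only
  congr 1
  funext s p
  rw [inner_scan, getD_index b PySem.Dict.empty p.2]
  simp
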